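-- pv_equiv track=rewrite | github.com/taeyoon-cloud/algorithm-programmers | 컨트롤 제트.py | solution
-- ===== SOURCE A (Python) =====
-- def solution(s):
--     arr = list(s.split())
--
--     total = 0
--     temp = 0
--     for i in range(len(arr)):
--         if arr[i] == 'Z':
--             total -= temp
--         else:
--             temp = int(arr[i])
--             total += temp
--
--     return total
-- ===== SOURCE B (Python) =====
-- def solution(s):
--     toks = s.split()
--     total = 0
--     i = 0
--     n = len(toks)
--     # skip leading 'Z' tokens: no preceding number, they contribute nothing
--     while i < n and toks[i] == 'Z':
--         i += 1
--     while i < n: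
--         v = int(toks[i])
--         i += 1
--         z = 0
--         while i < n and toks[i] == 'Z':
--             z += 1
--             i += 1
--         total += v * (1 - z)
--     return total
-- ===== Notes on version B (the rewrite author's own statement) =====
-- stated objective: alternative
-- what changed: Instead of A's single pass carrying a last-number register that each 'Z' subtracts, B walks the token list number by number, counts the run of consecutive 'Z' tokens after each number, and adds value*(1-z) per group; leading 'Z' tokens are skipped.
import Mathlib
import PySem

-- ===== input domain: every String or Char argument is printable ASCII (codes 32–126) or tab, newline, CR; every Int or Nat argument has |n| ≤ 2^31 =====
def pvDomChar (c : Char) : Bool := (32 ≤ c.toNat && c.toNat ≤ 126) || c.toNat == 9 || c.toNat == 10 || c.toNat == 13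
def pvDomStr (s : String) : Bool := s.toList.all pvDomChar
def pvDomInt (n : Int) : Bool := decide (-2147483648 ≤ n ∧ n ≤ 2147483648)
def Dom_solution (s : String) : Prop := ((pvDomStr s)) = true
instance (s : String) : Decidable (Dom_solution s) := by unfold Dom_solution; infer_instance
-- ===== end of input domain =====

-- B is an alternative decomposition: it walks the tokens number by number, counting the run
-- of consecutive 'Z' tokens after each number and adding value*(1-z) per group, instead of
-- A's running last-number register subtracted once per 'Z'.

-- ===== PORT A =====
-- A's loop state is (total, temp); int(arr[i]) is ported as (ofStr? t).getD 0, exact on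
-- Pre_solution (which requires every non-'Z' token to parse).
def solution (s : String) : Int :=
  let arr := PySem.Str.split₀ s
  let st := (PySem.List.pyRange 0 (arr.length : Int) 1).foldl
    (fun (st : Int × Int) i =>
      let t := PySem.List.pyGetD arr i ""
      if t == "Z" then (st.1 - st.2, st.2)
      else
        let v := (PySem.Int.ofStr? t).getD 0
        (st.1 + v, v))
    (0, 0)
  st.1

-- ===== PORT B =====
-- count the leading run of "Z" tokens, returning (run length, remainder)
def countZ : List String → Nat × List String
  | [] => (0, [])
  | t :: rest =>
    if t == "Z" then
      let p := countZ rest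
      (p.1 + 1, p.2)
    else (0, t :: rest)

theorem countZ_len_le : ∀ l : List String, (countZ l).2.length ≤ l.length
  | [] => le_refl _
  | t :: rest => by
    simp only [countZ]
    split
    · exact le_trans (countZ_len_le rest) (Nat.le_succ _)
    · exact le_refl _

-- B's main walk: skip leading 'Z's; at a number, parse it, consume the following 'Z' run
def altGo : List String → Int
  | [] => 0
  | t :: rest =>
    if t == "Z" then altGo rest
    else
      let v := (PySem.Int.ofStr? t).getD 0
      let p := countZ rest
      v * (1 - (p.1 : Int)) + altGo p.2
termination_by l => l.length
decreasing_by
  all_goals have := countZ_len_le rest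
  all_goals simp
  all_goals omega

def solution_alt (s : String) : Int := altGo (PySem.Str.split₀ s)

-- ===== PRECONDITION & SPEC =====
-- Pre_: every non-'Z' token parses as a Python int (otherwise A raises ValueError)
def Pre_solution (s : String) : Prop :=
  ∀ t ∈ PySem.Str.split₀ s, t ≠ "Z" → (PySem.Int.ofStr? t).isSome = true
instance (s : String) : Decidable (Pre_solution s) := by unfold Pre_solution; infer_instance
def pvWitness_solution : String := "1 2 Z Z 30 Z -4"

def Spec_solution (s : String) (out : Int) : Prop := out = solution_alt s
instance (s : String) (out : Int) : Decidable (Spec_solution s out) := by unfold Spec_solution; infer_instance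

-- ===== CLAIM (what is proved, stated in full; the proofs are below) =====
def Claim_equal_solution : Prop := ∀ (s : String), Dom_solution s → Pre_solution s → Spec_solution s (solution s)

-- ===== LEMMAS AND PROOFS =====

-- A's loop body as a fold step
def stepA (st : Int × Int) (t : String) : Int × Int :=
  if t == "Z" then (st.1 - st.2, st.2)
  else
    let v := (PySem.Int.ofStr? t).getD 0
    (st.1 + v, v)

theorem countZ_decomp : ∀ l : List String,
    l = List.replicate (countZ l).1 "Z" ++ (countZ l).2 ∧
    (∀ u rest', (countZ l).2 = u :: rest' → u ≠ "Z")
  | [] => ⟨rfl, by intro u r h; simp [countZ] at h⟩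
  | t :: rest => by
    by_cases h : t = "Z"
    · obtain ⟨h1, h2⟩ := countZ_decomp rest
      subst h
      constructor
      · simp only [countZ, beq_self_eq_true, if_true]
        conv_lhs => rw [h1]
        simp [List.replicate_succ]
      · simpa [countZ] using h2
    · constructor
      · simp [countZ, h]
      · intro u r hr
        simp [countZ, h] at hr
        exact hr.1 ▸ h

-- a run of z 'Z' tokens subtracts temp z times and leaves temp unchanged
theorem foldZ_run (z : Nat) (rest : List String) (tot tmp : Int) :
    (List.replicate z "Z" ++ rest).foldl stepA (tot, tmp)
      = rest.foldl stepA (tot - z * tmp, tmp) := by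
  induction z generalizing tot with
  | zero => simp
  | succ n ih =>
    simp only [List.replicate_succ, List.cons_append, List.foldl_cons]
    rw [show stepA (tot, tmp) "Z" = (tot - tmp, tmp) by simp [stepA]]
    rw [ih]
    congr 2
    push_cast
    ring

-- if the list is empty or starts with a non-'Z' token, the incoming temp is irrelevant
theorem fold_reset (l : List String) (hl : ∀ u r, l = u :: r → u ≠ "Z") (tot tmp : Int) :
    (l.foldl stepA (tot, tmp)).1 = (l.foldl stepA (tot, 0)).1 := by
  cases l with
  | nil => rfl
  | cons u r =>
    have hu : u ≠ "Z" := hl u r rfl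
    simp only [List.foldl_cons]
    rw [show stepA (tot, tmp) u = stepA (tot, 0) u by simp [stepA, hu]]

theorem main_inv : ∀ (l : List String) (tot : Int),
    (l.foldl stepA (tot, 0)).1 = tot + altGo l
  | [], tot => by simp [altGo]
  | t :: rest, tot => by
    by_cases h : t = "Z"
    · subst h
      simp only [List.foldl_cons]
      rw [show stepA (tot, 0) "Z" = (tot, 0) by simp [stepA]]
      rw [main_inv rest tot]
      simp [altGo]
    · simp only [List.foldl_cons]
      rw [show stepA (tot, 0) t = (tot + (PySem.Int.ofStr? t).getD 0, (PySem.Int.ofStr? t).getD 0)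
            by simp [stepA, h]]
      set v := (PySem.Int.ofStr? t).getD 0 with hv
      obtain ⟨hd, hnz⟩ := countZ_decomp rest
      conv_lhs => rw [hd]
      rw [foldZ_run, fold_reset _ hnz]
      rw [main_inv (countZ rest).2 (tot + v - (countZ rest).1 * v)]
      simp only [altGo]
      simp [h]
      ring
termination_by l => l.length
decreasing_by
  all_goals have := countZ_len_le rest
  all_goals simp
  all_goals omega

-- ===== VERDICT (by name: the statement is the Claim_ definition above) =====
theorem solution_spec : Claim_equal_solution := by
  intro s _ _
  show solution s = solution_alt s
  have h : solution s = ((PySem.Str.split₀ s).foldl stepA (0, 0)).1 :=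
    congrArg Prod.fst
      (PySem.List.foldl_pyRange_zero_pyGetD' (PySem.Str.split₀ s) "" stepA ((0 : Int), (0 : Int)))
  rw [h, main_inv]
  simp [solution_alt]
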